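-- pv_equiv track=rewrite | github.com/pwmcclung/codeProbs | mut_str.py | mutate_my_strings
-- ===== SOURCE A (Python) =====
-- def mutate_my_strings(s1,s2):
--     string_one = list(s1)
--     string_two = list(s2)
--     mutated_strings = [''.join(string_one)]
--     for x in range(len(string_one)):
--         if string_one[x] != string_two[x]:
--             string_one[x] = string_two[x]
--             mutated_strings.append(''.join(string_one))
--     return '\n'.join(mutated_strings)+'\n'
-- ===== SOURCE B (Python) =====
-- def mutate_my_strings(s1, s2):
--     # indices where the strings differ (indexing s2[i] so a shorter s2 raises
--     # IndexError exactly as the original does)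
--     diffs = [i for i in range(len(s1)) if s1[i] != s2[i]]
--     lines = [s1] + [s2[:p + 1] + s1[p + 1:] for p in diffs]
--     return '\n'.join(lines) + '\n'
-- ===== Notes on version B (the rewrite author's own statement) =====
-- stated objective: alternative
-- what changed: B first collects the differing indices, then builds each output line directly by slicing (s2[:p+1]+s1[p+1:]) instead of repeatedly mutating a character list and re-joining it with ''.join per step.
import Mathlib
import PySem

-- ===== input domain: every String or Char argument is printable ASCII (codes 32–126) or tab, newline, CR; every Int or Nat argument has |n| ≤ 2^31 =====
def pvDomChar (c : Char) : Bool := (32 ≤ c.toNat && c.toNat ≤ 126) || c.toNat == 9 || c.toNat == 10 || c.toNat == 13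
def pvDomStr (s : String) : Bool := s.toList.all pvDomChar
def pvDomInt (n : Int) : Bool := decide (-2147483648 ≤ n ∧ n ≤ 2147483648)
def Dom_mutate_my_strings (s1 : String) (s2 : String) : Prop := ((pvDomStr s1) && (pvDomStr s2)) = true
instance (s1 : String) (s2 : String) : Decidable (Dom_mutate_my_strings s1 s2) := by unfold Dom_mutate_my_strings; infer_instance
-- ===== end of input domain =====

-- B builds each line by slicing from the differing indices instead of mutating a buffer; same cost, different decomposition.

-- ===== PORT A =====
-- state: (mutated character buffer, accumulated output lines); string_two[x] is in range under Pre_.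
def mutate_my_strings (s1 : String) (s2 : String) : String :=
  let string_one := s1.toList
  let string_two := s2.toList
  let st := (List.range string_one.length).foldl
    (fun (st : List Char × List String) x =>
      if st.1.getD x ' ' ≠ string_two.getD x ' ' then
        let cur := st.1.set x (string_two.getD x ' ')
        (cur, st.2 ++ [String.ofList cur])
      else st)
    (string_one, [String.ofList string_one])
  PySem.Str.join "\n" st.2 ++ "\n"

-- ===== PORT B =====
-- s2[:p+1] / s1[p+1:] with nonnegative bounds are take/drop (PySem.List.slice_to_natCast / slice_from_natCast).
def mutate_my_strings_alt (s1 : String) (s2 : String) : String :=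
  let c1 := s1.toList
  let c2 := s2.toList
  let diffs := (List.range c1.length).filter (fun i => c1.getD i ' ' ≠ c2.getD i ' ')
  let lines := String.ofList c1 :: diffs.map (fun p => String.ofList (c2.take (p + 1) ++ c1.drop (p + 1)))
  PySem.Str.join "\n" lines ++ "\n"

-- ===== PRECONDITION & SPEC =====
-- Pre_ excludes len(s1) > len(s2): there both Pythons raise IndexError on s2[x].
def Pre_mutate_my_strings (s1 : String) (s2 : String) : Prop := s1.toList.length ≤ s2.toList.length
instance (s1 : String) (s2 : String) : Decidable (Pre_mutate_my_strings s1 s2) := by unfold Pre_mutate_my_strings; infer_instance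
def pvWitness_mutate_my_strings : String × String := ("cat", "dog")

def Spec_mutate_my_strings (s1 : String) (s2 : String) (out : String) : Prop := out = mutate_my_strings_alt s1 s2
instance (s1 : String) (s2 : String) (out : String) : Decidable (Spec_mutate_my_strings s1 s2 out) := by unfold Spec_mutate_my_strings; infer_instance

-- ===== CLAIM (what is proved, stated in full; the proofs are below) =====
def Claim_equal_mutate_my_strings : Prop := ∀ (s1 : String) (s2 : String), Dom_mutate_my_strings s1 s2 → Pre_mutate_my_strings s1 s2 → Spec_mutate_my_strings s1 s2 (mutate_my_strings s1 s2)

-- ===== LEMMAS AND PROOFS =====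

-- after processing indices [0, n) the buffer equals l2.take n ++ l1.drop n and the
-- accumulated lines are exactly B's lines for the differing indices below n
theorem mutate_loop_inv (l1 l2 : List Char) (h : l1.length ≤ l2.length)
    (n : Nat) (hn : n ≤ l1.length) :
    (List.range n).foldl
      (fun (st : List Char × List String) x =>
        if st.1.getD x ' ' ≠ l2.getD x ' ' then
          let cur := st.1.set x (l2.getD x ' ')
          (cur, st.2 ++ [String.ofList cur])
        else st)
      (l1, [String.ofList l1])
    = (l2.take n ++ l1.drop n,
       String.ofList l1 :: ((List.range n).filter (fun i => l1.getD i ' ' ≠ l2.getD i ' ')).map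
         (fun p => String.ofList (l2.take (p + 1) ++ l1.drop (p + 1)))) := by
  induction n with
  | zero => simp
  | succ k ih =>
    have hk : k ≤ l1.length := Nat.le_of_succ_le hn
    have hk' : k < l1.length := hn
    have hk2 : k < l2.length := lt_of_lt_of_le hk' h
    have hlen : (l2.take k).length = k := by simp [Nat.min_eq_left (le_of_lt hk2)]
    rw [List.range_succ, List.foldl_append, ih hk, List.filter_append, List.map_append]
    have hget1 : (l2.take k ++ l1.drop k).getD k ' ' = l1.getD k ' ' := by
      simp [List.getD_eq_getElem?_getD, List.getElem?_append_right, hlen, List.getElem?_drop]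
    have htake : l2.take (k + 1) = l2.take k ++ [l2[k]] := List.take_succ_eq_append_getElem hk2
    have hdrop : l1.drop k = l1[k] :: l1.drop (k + 1) := (List.drop_eq_getElem_cons hk').symm ▸ rfl
    have hset : (l2.take k ++ l1.drop k).set k (l2.getD k ' ') =
        l2.take (k + 1) ++ l1.drop (k + 1) := by
      rw [hdrop, List.set_append, if_neg (by omega), hlen, Nat.sub_self, List.set_cons_zero,
        htake, List.getD_eq_getElem l2 ' ' hk2, List.append_assoc, List.singleton_append]
    simp only [List.foldl_cons, List.foldl_nil]
    by_cases hdiff : l1.getD k ' ' = l2.getD k ' '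
    · -- equal at k: buffer already agrees, no line appended, filter skips k
      have heq : l2.take k ++ l1.drop k = l2.take (k + 1) ++ l1.drop (k + 1) := by
        have hv : l1[k] = l2[k] := by
          rwa [List.getD_eq_getElem l1 ' ' hk', List.getD_eq_getElem l2 ' ' hk2] at hdiff
        rw [hdrop, hv, htake, List.append_assoc, List.singleton_append]
      rw [if_neg (by rw [hget1]; simpa using hdiff), heq, List.filter_cons]
      simp only [List.getD_eq_getElem?_getD] at hdiff
      simp [hdiff]
    · rw [if_pos (by rw [hget1]; exact hdiff), hset, List.filter_cons]
      simp only [List.getD_eq_getElem?_getD] at hdiff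
      simp [hdiff]

theorem mutate_my_strings_eq (s1 s2 : String) (h : Pre_mutate_my_strings s1 s2) :
    mutate_my_strings s1 s2 = mutate_my_strings_alt s1 s2 := by
  unfold Pre_mutate_my_strings at h
  simp only [mutate_my_strings, mutate_my_strings_alt]
  rw [mutate_loop_inv s1.toList s2.toList h s1.toList.length le_rfl]

-- ===== VERDICT (by name: the statement is the Claim_ definition above) =====
theorem mutate_my_strings_spec : Claim_equal_mutate_my_strings := by
  intro s1 s2 _ hpre
  exact mutate_my_strings_eq s1 s2 hpre
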